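-- pv_equiv track=rewrite | github.com/mattblferrer/competitive-programming | hackerrank/Leonardo's Prime Factors.py | primeCount
-- ===== SOURCE A (Python) =====
-- import math
--
-- def primeCount(n):
--     def isPrime(n):
--         for i in range(2, int(math.sqrt(n)) + 1):
--             if n % i == 0:
--                 return False
--         return n > 1
--
--     def nextPrime(n):
--         while True:
--             n += 1
--             if isPrime(n):
--                 return n
--
--     # generate list of products of primes up to limit
--     limit = 10 ** 18
--     prime_product = 1
--     curr_prime = 2
--     prime_products = []
--
--     while prime_product <= limit:
--         prime_product *= curr_prime
--         prime_products.append(prime_product)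
--         curr_prime = nextPrime(curr_prime)
--
--     # find smallest i where product of first i primes greater than n
--     for i, prime_product in enumerate(prime_products):
--         if prime_product > n:
--             return i
-- ===== SOURCE B (Python) =====
-- def primeCount(n):
--     # Different algorithm: sieve of Eratosthenes for the primes, prefix products,
--     # then a binary search for the first primorial exceeding n.
--     LIMIT = 10 ** 18
--     sieve = [True] * 60
--     sieve[0] = sieve[1] = False
--     for p in range(2, 60):
--         if sieve[p]:
--             for m in range(p * p, 60, p):
--                 sieve[m] = False
--     products = []
--     acc = 1
--     for p in range(2, 60):
--         if sieve[p]: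
--             acc *= p
--             products.append(acc)
--             if acc > LIMIT:
--                 break
--     # binary search: smallest index lo with products[lo] > n (products strictly increasing)
--     lo, hi = 0, len(products)
--     while lo < hi:
--         mid = (lo + hi) // 2
--         if products[mid] > n:
--             hi = mid
--         else:
--             lo = mid + 1
--     if lo < len(products):
--         return lo
-- ===== Notes on version B (the rewrite author's own statement) =====
-- stated objective: alternative
-- what changed: B replaces A's trial-division isPrime/nextPrime generator and linear enumerate-scan with a sieve of Eratosthenes to get the primes, a prefix-product pass to build the primorials, and a binary search for the first primorial exceeding n.
import Mathlib
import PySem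

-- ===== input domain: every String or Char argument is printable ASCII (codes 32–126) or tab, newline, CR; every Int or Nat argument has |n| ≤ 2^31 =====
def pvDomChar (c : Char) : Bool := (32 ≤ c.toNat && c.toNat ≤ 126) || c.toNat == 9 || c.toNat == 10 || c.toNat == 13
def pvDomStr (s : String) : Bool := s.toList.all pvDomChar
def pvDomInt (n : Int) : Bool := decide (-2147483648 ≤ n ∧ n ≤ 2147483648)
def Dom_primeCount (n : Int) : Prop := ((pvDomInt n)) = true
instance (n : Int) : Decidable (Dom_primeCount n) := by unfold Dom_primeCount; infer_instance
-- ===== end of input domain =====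

-- B swaps A's trial-division prime generator + linear table scan for a sieve of Eratosthenes,
-- a prefix-product pass and a binary search (objective: alternative algorithm).
-- Python returns None when every primorial is ≤ n (first at n ≥ 2*3*...*53 ≈ 3.3*10^19); both ports
-- return -1 there, which is unreachable on Dom (|n| ≤ 2^31).

-- ===== PORT A =====
-- int(math.sqrt(n)) ported as integer ⌊√n⌋: exact, since math.sqrt is correctly rounded and every
-- argument isPrime is reached with here is a small positive integer (candidate primes ≤ 60)
def isqrtA (fuel : Nat) (k i : Int) : Int :=
  match fuel with
  | 0 => i
  | f + 1 => if (i + 1) * (i + 1) ≤ k then isqrtA f k (i + 1) else i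

-- 'for i in range(2, int(math.sqrt(n)) + 1): if n % i == 0: return False / return n > 1'
def trialA : List Int → Int → Bool
  | [], n => decide (n > 1)
  | i :: rest, n => if PySem.Int.mod n i == 0 then false else trialA rest n

def isPrimeA (n : Int) : Bool :=
  trialA (PySem.List.pyRange 2 (isqrtA n.toNat n 0 + 1) 1) n

-- 'while True: n += 1; if isPrime(n): return n' — fuel 64 covers every prime gap reached
def nextPrimeA (fuel : Nat) (n : Int) : Int :=
  match fuel with
  | 0 => n + 1
  | f + 1 => if isPrimeA (n + 1) then n + 1 else nextPrimeA f (n + 1)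

-- 'while prime_product <= limit: prime_product *= curr_prime; append; curr_prime = nextPrime(curr_prime)'
-- fuel 64 suffices: the product exceeds 10^18 after 16 iterations
def buildA (fuel : Nat) (product curr : Int) : List Int :=
  match fuel with
  | 0 => []
  | f + 1 =>
    if product ≤ 10 ^ 18 then
      let p := product * curr
      p :: buildA f p (nextPrimeA 64 curr)
    else []

-- 'for i, prime_product in enumerate(prime_products): if prime_product > n: return i' (falls off: None → -1)
def scanA (n i : Int) : List Int → Int
  | [] => -1
  | p :: rest => if p > n then i else scanA n (i + 1) rest

def primeCount (n : Int) : Int :=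
  scanA n 0 (buildA 64 1 2)

-- ===== PORT B =====
-- sieve of Eratosthenes on a 60-entry boolean table; every index is a small non-negative int,
-- so .toNat list indexing and List.set are exact for Python's sieve[m] = False
def sieveB : List Bool :=
  let s := ((List.replicate 60 true).set 0 false).set 1 false
  (PySem.List.pyRange 2 60 1).foldl (fun s p =>
    if s.getD p.toNat false then
      (PySem.List.pyRange (p * p) 60 p).foldl (fun s m => s.set m.toNat false) s
    else s) s

-- 'for p in range(2,60): if sieve[p]: acc *= p; products.append(acc); if acc > LIMIT: break'
-- the break is modelled by a stopped flag carried through the fold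
def buildB : List Int :=
  ((PySem.List.pyRange 2 60 1).foldl (fun (st : List Int × Int × Bool) p =>
    if st.2.2 then st
    else if sieveB.getD p.toNat false then
      let acc := st.2.1 * p
      (st.1 ++ [acc], acc, decide (acc > 10 ^ 18))
    else st) ([], 1, false)).1

-- 'while lo < hi: mid = (lo+hi)//2; if products[mid] > n: hi = mid else: lo = mid+1' — fuel 8 > log2 16
def bsearchB (fuel : Nat) (lo hi n : Int) (prods : List Int) : Int :=
  match fuel with
  | 0 => lo
  | f + 1 =>
    if lo < hi then
      let mid := PySem.Int.floordiv (lo + hi) 2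
      if prods.getD mid.toNat 0 > n then bsearchB f lo mid n prods
      else bsearchB f (mid + 1) hi n prods
    else lo

-- 'if lo < len(products): return lo' (falls off: None → -1)
def primeCount_alt (n : Int) : Int :=
  let prods := buildB
  let lo := bsearchB 8 0 (prods.length : Int) n prods
  if lo < (prods.length : Int) then lo else -1

-- ===== PRECONDITION & SPEC =====
def Spec_primeCount (n : Int) (out : Int) : Prop := out = primeCount_alt n
instance (n : Int) (out : Int) : Decidable (Spec_primeCount n out) := by unfold Spec_primeCount; infer_instance

-- ===== CLAIM (what is proved, stated in full; the proofs are below) =====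
def Claim_equal_primeCount : Prop := ∀ (n : Int), Dom_primeCount n → Spec_primeCount n (primeCount n)

-- ===== LEMMAS AND PROOFS =====
-- the common table of the 16 primorials, as a named literal used by the proofs
def tableL : List Int := [2, 6, 30, 210, 2310, 30030, 510510, 9699690, 223092870,
    6469693230, 200560490130, 7420738134810, 304250263527210, 13082761331670030,
    614889782588491410, 32589158477190044730]

-- A's table of primorials, evaluated once
theorem tableA_eq : buildA 64 1 2 = tableL := by decide

-- B's table of primorials (sieve + prefix products), evaluated once: the same list
set_option maxRecDepth 10000 in
theorem tableB_eq : buildB = tableL := by decide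

-- one unfolding step of the binary-search loop
theorem bsearchB_succ (f : Nat) (lo hi n : Int) (prods : List Int) :
    bsearchB (f + 1) lo hi n prods =
      if lo < hi then
        (if prods.getD (PySem.Int.floordiv (lo + hi) 2).toNat 0 > n then
          bsearchB f lo (PySem.Int.floordiv (lo + hi) 2) n prods
        else bsearchB f (PySem.Int.floordiv (lo + hi) 2 + 1) hi n prods)
      else lo := rfl

-- evaluation of each binary-search node reached from (lo, hi) = (0, 16), bottom-up
theorem bs_3_0_0 (n : Int) : bsearchB 3 0 0 n tableL = 0 := by
  rw [bsearchB_succ]; norm_num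
theorem bs_3_1_1 (n : Int) : bsearchB 3 1 1 n tableL = 1 := by
  rw [bsearchB_succ]; norm_num
theorem bs_4_0_1 (n : Int) : bsearchB 4 0 1 n tableL =
    (if (2:Int) > n then bsearchB 3 0 0 n tableL else bsearchB 3 1 1 n tableL) := by
  rw [bsearchB_succ]; norm_num [PySem.Int.floordiv, Int.fdiv_eq_ediv, tableL, Int.toNat,
    List.getElem_cons_succ, List.getElem_cons_zero]
theorem bs_4_2_2 (n : Int) : bsearchB 4 2 2 n tableL = 2 := by
  rw [bsearchB_succ]; norm_num
theorem bs_5_0_2 (n : Int) : bsearchB 5 0 2 n tableL =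
    (if (6:Int) > n then bsearchB 4 0 1 n tableL else bsearchB 4 2 2 n tableL) := by
  rw [bsearchB_succ]; norm_num [PySem.Int.floordiv, Int.fdiv_eq_ediv, tableL, Int.toNat,
    List.getElem_cons_succ, List.getElem_cons_zero]
theorem bs_4_3_3 (n : Int) : bsearchB 4 3 3 n tableL = 3 := by
  rw [bsearchB_succ]; norm_num
theorem bs_4_4_4 (n : Int) : bsearchB 4 4 4 n tableL = 4 := by
  rw [bsearchB_succ]; norm_num
theorem bs_5_3_4 (n : Int) : bsearchB 5 3 4 n tableL =
    (if (210:Int) > n then bsearchB 4 3 3 n tableL else bsearchB 4 4 4 n tableL) := by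
  rw [bsearchB_succ]; norm_num [PySem.Int.floordiv, Int.fdiv_eq_ediv, tableL, Int.toNat,
    List.getElem_cons_succ, List.getElem_cons_zero]
theorem bs_6_0_4 (n : Int) : bsearchB 6 0 4 n tableL =
    (if (30:Int) > n then bsearchB 5 0 2 n tableL else bsearchB 5 3 4 n tableL) := by
  rw [bsearchB_succ]; norm_num [PySem.Int.floordiv, Int.fdiv_eq_ediv, tableL, Int.toNat,
    List.getElem_cons_succ, List.getElem_cons_zero]
theorem bs_4_5_5 (n : Int) : bsearchB 4 5 5 n tableL = 5 := by
  rw [bsearchB_succ]; norm_num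
theorem bs_4_6_6 (n : Int) : bsearchB 4 6 6 n tableL = 6 := by
  rw [bsearchB_succ]; norm_num
theorem bs_5_5_6 (n : Int) : bsearchB 5 5 6 n tableL =
    (if (30030:Int) > n then bsearchB 4 5 5 n tableL else bsearchB 4 6 6 n tableL) := by
  rw [bsearchB_succ]; norm_num [PySem.Int.floordiv, Int.fdiv_eq_ediv, tableL, Int.toNat,
    List.getElem_cons_succ, List.getElem_cons_zero]
theorem bs_4_7_7 (n : Int) : bsearchB 4 7 7 n tableL = 7 := by
  rw [bsearchB_succ]; norm_num
theorem bs_4_8_8 (n : Int) : bsearchB 4 8 8 n tableL = 8 := by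
  rw [bsearchB_succ]; norm_num
theorem bs_5_7_8 (n : Int) : bsearchB 5 7 8 n tableL =
    (if (9699690:Int) > n then bsearchB 4 7 7 n tableL else bsearchB 4 8 8 n tableL) := by
  rw [bsearchB_succ]; norm_num [PySem.Int.floordiv, Int.fdiv_eq_ediv, tableL, Int.toNat,
    List.getElem_cons_succ, List.getElem_cons_zero]
theorem bs_6_5_8 (n : Int) : bsearchB 6 5 8 n tableL =
    (if (510510:Int) > n then bsearchB 5 5 6 n tableL else bsearchB 5 7 8 n tableL) := by
  rw [bsearchB_succ]; norm_num [PySem.Int.floordiv, Int.fdiv_eq_ediv, tableL, Int.toNat,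
    List.getElem_cons_succ, List.getElem_cons_zero]
theorem bs_7_0_8 (n : Int) : bsearchB 7 0 8 n tableL =
    (if (2310:Int) > n then bsearchB 6 0 4 n tableL else bsearchB 6 5 8 n tableL) := by
  rw [bsearchB_succ]; norm_num [PySem.Int.floordiv, Int.fdiv_eq_ediv, tableL, Int.toNat,
    List.getElem_cons_succ, List.getElem_cons_zero]
theorem bs_4_9_9 (n : Int) : bsearchB 4 9 9 n tableL = 9 := by
  rw [bsearchB_succ]; norm_num
theorem bs_4_10_10 (n : Int) : bsearchB 4 10 10 n tableL = 10 := by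
  rw [bsearchB_succ]; norm_num
theorem bs_5_9_10 (n : Int) : bsearchB 5 9 10 n tableL =
    (if (6469693230:Int) > n then bsearchB 4 9 9 n tableL else bsearchB 4 10 10 n tableL) := by
  rw [bsearchB_succ]; norm_num [PySem.Int.floordiv, Int.fdiv_eq_ediv, tableL, Int.toNat,
    List.getElem_cons_succ, List.getElem_cons_zero]
theorem bs_4_11_11 (n : Int) : bsearchB 4 11 11 n tableL = 11 := by
  rw [bsearchB_succ]; norm_num
theorem bs_4_12_12 (n : Int) : bsearchB 4 12 12 n tableL = 12 := by
  rw [bsearchB_succ]; norm_num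
theorem bs_5_11_12 (n : Int) : bsearchB 5 11 12 n tableL =
    (if (7420738134810:Int) > n then bsearchB 4 11 11 n tableL else bsearchB 4 12 12 n tableL) := by
  rw [bsearchB_succ]; norm_num [PySem.Int.floordiv, Int.fdiv_eq_ediv, tableL, Int.toNat,
    List.getElem_cons_succ, List.getElem_cons_zero]
theorem bs_6_9_12 (n : Int) : bsearchB 6 9 12 n tableL =
    (if (200560490130:Int) > n then bsearchB 5 9 10 n tableL else bsearchB 5 11 12 n tableL) := by
  rw [bsearchB_succ]; norm_num [PySem.Int.floordiv, Int.fdiv_eq_ediv, tableL, Int.toNat,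
    List.getElem_cons_succ, List.getElem_cons_zero]
theorem bs_4_13_13 (n : Int) : bsearchB 4 13 13 n tableL = 13 := by
  rw [bsearchB_succ]; norm_num
theorem bs_4_14_14 (n : Int) : bsearchB 4 14 14 n tableL = 14 := by
  rw [bsearchB_succ]; norm_num
theorem bs_5_13_14 (n : Int) : bsearchB 5 13 14 n tableL =
    (if (13082761331670030:Int) > n then bsearchB 4 13 13 n tableL else bsearchB 4 14 14 n tableL) := by
  rw [bsearchB_succ]; norm_num [PySem.Int.floordiv, Int.fdiv_eq_ediv, tableL, Int.toNat,
    List.getElem_cons_succ, List.getElem_cons_zero]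
theorem bs_4_15_15 (n : Int) : bsearchB 4 15 15 n tableL = 15 := by
  rw [bsearchB_succ]; norm_num
theorem bs_4_16_16 (n : Int) : bsearchB 4 16 16 n tableL = 16 := by
  rw [bsearchB_succ]; norm_num
theorem bs_5_15_16 (n : Int) : bsearchB 5 15 16 n tableL =
    (if (32589158477190044730:Int) > n then bsearchB 4 15 15 n tableL else bsearchB 4 16 16 n tableL) := by
  rw [bsearchB_succ]; norm_num [PySem.Int.floordiv, Int.fdiv_eq_ediv, tableL, Int.toNat,
    List.getElem_cons_succ, List.getElem_cons_zero]
theorem bs_6_13_16 (n : Int) : bsearchB 6 13 16 n tableL =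
    (if (614889782588491410:Int) > n then bsearchB 5 13 14 n tableL else bsearchB 5 15 16 n tableL) := by
  rw [bsearchB_succ]; norm_num [PySem.Int.floordiv, Int.fdiv_eq_ediv, tableL, Int.toNat,
    List.getElem_cons_succ, List.getElem_cons_zero]
theorem bs_7_9_16 (n : Int) : bsearchB 7 9 16 n tableL =
    (if (304250263527210:Int) > n then bsearchB 6 9 12 n tableL else bsearchB 6 13 16 n tableL) := by
  rw [bsearchB_succ]; norm_num [PySem.Int.floordiv, Int.fdiv_eq_ediv, tableL, Int.toNat,
    List.getElem_cons_succ, List.getElem_cons_zero]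
theorem bs_8_0_16 (n : Int) : bsearchB 8 0 16 n tableL =
    (if (223092870:Int) > n then bsearchB 7 0 8 n tableL else bsearchB 7 9 16 n tableL) := by
  rw [bsearchB_succ]; norm_num [PySem.Int.floordiv, Int.fdiv_eq_ediv, tableL, Int.toNat,
    List.getElem_cons_succ, List.getElem_cons_zero]

-- ===== VERDICT (by name: the statement is the Claim_ definition above) =====
set_option maxHeartbeats 2000000 in
theorem primeCount_spec : Claim_equal_primeCount := by
  intro n _
  unfold Spec_primeCount primeCount primeCount_alt
  show scanA n 0 (buildA 64 1 2) =
    (if bsearchB 8 0 (buildB.length : Int) n buildB < (buildB.length : Int) then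
      bsearchB 8 0 (buildB.length : Int) n buildB
    else -1)
  rw [tableA_eq, tableB_eq, show ((tableL.length : Nat) : Int) = 16 from rfl]
  simp only [bs_8_0_16, bs_7_9_16, bs_6_13_16, bs_5_15_16, bs_4_16_16, bs_4_15_15, bs_5_13_14, bs_4_14_14, bs_4_13_13, bs_6_9_12, bs_5_11_12, bs_4_12_12, bs_4_11_11, bs_5_9_10, bs_4_10_10, bs_4_9_9, bs_7_0_8, bs_6_5_8, bs_5_7_8, bs_4_8_8, bs_4_7_7, bs_5_5_6, bs_4_6_6, bs_4_5_5, bs_6_0_4, bs_5_3_4, bs_4_4_4, bs_4_3_3, bs_5_0_2, bs_4_2_2, bs_4_0_1, bs_3_1_1, bs_3_0_0]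
  simp only [tableL, scanA]
  by_cases h0 : n < 2
  · have c1 : n < 6 := by omega
    have c2 : n < 30 := by omega
    have c3 : n < 210 := by omega
    have c4 : n < 2310 := by omega
    have c5 : n < 30030 := by omega
    have c6 : n < 510510 := by omega
    have c7 : n < 9699690 := by omega
    have c8 : n < 223092870 := by omega
    have c9 : n < 6469693230 := by omega
    have c10 : n < 200560490130 := by omega
    have c11 : n < 7420738134810 := by omega
    have c12 : n < 304250263527210 := by omega
    have c13 : n < 13082761331670030 := by omega
    have c14 : n < 614889782588491410 := by omega
    have c15 : n < 32589158477190044730 := by omega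
    simp only [if_pos h0, if_pos c1, if_pos c2, if_pos c3, if_pos c4, if_pos c5, if_pos c6, if_pos c7, if_pos c8, if_pos c9, if_pos c10, if_pos c11, if_pos c12, if_pos c13, if_pos c14, if_pos c15]
    norm_num
  by_cases h1 : n < 6
  · have c2 : n < 30 := by omega
    have c3 : n < 210 := by omega
    have c4 : n < 2310 := by omega
    have c5 : n < 30030 := by omega
    have c6 : n < 510510 := by omega
    have c7 : n < 9699690 := by omega
    have c8 : n < 223092870 := by omega
    have c9 : n < 6469693230 := by omega
    have c10 : n < 200560490130 := by omega
    have c11 : n < 7420738134810 := by omega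
    have c12 : n < 304250263527210 := by omega
    have c13 : n < 13082761331670030 := by omega
    have c14 : n < 614889782588491410 := by omega
    have c15 : n < 32589158477190044730 := by omega
    simp only [if_neg h0, if_pos h1, if_pos c2, if_pos c3, if_pos c4, if_pos c5, if_pos c6, if_pos c7, if_pos c8, if_pos c9, if_pos c10, if_pos c11, if_pos c12, if_pos c13, if_pos c14, if_pos c15]
    norm_num
  by_cases h2 : n < 30
  · have c3 : n < 210 := by omega
    have c4 : n < 2310 := by omega
    have c5 : n < 30030 := by omega
    have c6 : n < 510510 := by omega
    have c7 : n < 9699690 := by omega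
    have c8 : n < 223092870 := by omega
    have c9 : n < 6469693230 := by omega
    have c10 : n < 200560490130 := by omega
    have c11 : n < 7420738134810 := by omega
    have c12 : n < 304250263527210 := by omega
    have c13 : n < 13082761331670030 := by omega
    have c14 : n < 614889782588491410 := by omega
    have c15 : n < 32589158477190044730 := by omega
    simp only [if_neg h0, if_neg h1, if_pos h2, if_pos c3, if_pos c4, if_pos c5, if_pos c6, if_pos c7, if_pos c8, if_pos c9, if_pos c10, if_pos c11, if_pos c12, if_pos c13, if_pos c14, if_pos c15]
    norm_num
  by_cases h3 : n < 210
  · have c4 : n < 2310 := by omega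
    have c5 : n < 30030 := by omega
    have c6 : n < 510510 := by omega
    have c7 : n < 9699690 := by omega
    have c8 : n < 223092870 := by omega
    have c9 : n < 6469693230 := by omega
    have c10 : n < 200560490130 := by omega
    have c11 : n < 7420738134810 := by omega
    have c12 : n < 304250263527210 := by omega
    have c13 : n < 13082761331670030 := by omega
    have c14 : n < 614889782588491410 := by omega
    have c15 : n < 32589158477190044730 := by omega
    simp only [if_neg h0, if_neg h1, if_neg h2, if_pos h3, if_pos c4, if_pos c5, if_pos c6, if_pos c7, if_pos c8, if_pos c9, if_pos c10, if_pos c11, if_pos c12, if_pos c13, if_pos c14, if_pos c15]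
    norm_num
  by_cases h4 : n < 2310
  · have c5 : n < 30030 := by omega
    have c6 : n < 510510 := by omega
    have c7 : n < 9699690 := by omega
    have c8 : n < 223092870 := by omega
    have c9 : n < 6469693230 := by omega
    have c10 : n < 200560490130 := by omega
    have c11 : n < 7420738134810 := by omega
    have c12 : n < 304250263527210 := by omega
    have c13 : n < 13082761331670030 := by omega
    have c14 : n < 614889782588491410 := by omega
    have c15 : n < 32589158477190044730 := by omega
    simp only [if_neg h0, if_neg h1, if_neg h2, if_neg h3, if_pos h4, if_pos c5, if_pos c6, if_pos c7, if_pos c8, if_pos c9, if_pos c10, if_pos c11, if_pos c12, if_pos c13, if_pos c14, if_pos c15]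
    norm_num
  by_cases h5 : n < 30030
  · have c6 : n < 510510 := by omega
    have c7 : n < 9699690 := by omega
    have c8 : n < 223092870 := by omega
    have c9 : n < 6469693230 := by omega
    have c10 : n < 200560490130 := by omega
    have c11 : n < 7420738134810 := by omega
    have c12 : n < 304250263527210 := by omega
    have c13 : n < 13082761331670030 := by omega
    have c14 : n < 614889782588491410 := by omega
    have c15 : n < 32589158477190044730 := by omega
    simp only [if_neg h0, if_neg h1, if_neg h2, if_neg h3, if_neg h4, if_pos h5, if_pos c6, if_pos c7, if_pos c8, if_pos c9, if_pos c10, if_pos c11, if_pos c12, if_pos c13, if_pos c14, if_pos c15]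
    norm_num
  by_cases h6 : n < 510510
  · have c7 : n < 9699690 := by omega
    have c8 : n < 223092870 := by omega
    have c9 : n < 6469693230 := by omega
    have c10 : n < 200560490130 := by omega
    have c11 : n < 7420738134810 := by omega
    have c12 : n < 304250263527210 := by omega
    have c13 : n < 13082761331670030 := by omega
    have c14 : n < 614889782588491410 := by omega
    have c15 : n < 32589158477190044730 := by omega
    simp only [if_neg h0, if_neg h1, if_neg h2, if_neg h3, if_neg h4, if_neg h5, if_pos h6, if_pos c7, if_pos c8, if_pos c9, if_pos c10, if_pos c11, if_pos c12, if_pos c13, if_pos c14, if_pos c15]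
    norm_num
  by_cases h7 : n < 9699690
  · have c8 : n < 223092870 := by omega
    have c9 : n < 6469693230 := by omega
    have c10 : n < 200560490130 := by omega
    have c11 : n < 7420738134810 := by omega
    have c12 : n < 304250263527210 := by omega
    have c13 : n < 13082761331670030 := by omega
    have c14 : n < 614889782588491410 := by omega
    have c15 : n < 32589158477190044730 := by omega
    simp only [if_neg h0, if_neg h1, if_neg h2, if_neg h3, if_neg h4, if_neg h5, if_neg h6, if_pos h7, if_pos c8, if_pos c9, if_pos c10, if_pos c11, if_pos c12, if_pos c13, if_pos c14, if_pos c15]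
    norm_num
  by_cases h8 : n < 223092870
  · have c9 : n < 6469693230 := by omega
    have c10 : n < 200560490130 := by omega
    have c11 : n < 7420738134810 := by omega
    have c12 : n < 304250263527210 := by omega
    have c13 : n < 13082761331670030 := by omega
    have c14 : n < 614889782588491410 := by omega
    have c15 : n < 32589158477190044730 := by omega
    simp only [if_neg h0, if_neg h1, if_neg h2, if_neg h3, if_neg h4, if_neg h5, if_neg h6, if_neg h7, if_pos h8, if_pos c9, if_pos c10, if_pos c11, if_pos c12, if_pos c13, if_pos c14, if_pos c15]
    norm_num
  by_cases h9 : n < 6469693230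
  · have c10 : n < 200560490130 := by omega
    have c11 : n < 7420738134810 := by omega
    have c12 : n < 304250263527210 := by omega
    have c13 : n < 13082761331670030 := by omega
    have c14 : n < 614889782588491410 := by omega
    have c15 : n < 32589158477190044730 := by omega
    simp only [if_neg h0, if_neg h1, if_neg h2, if_neg h3, if_neg h4, if_neg h5, if_neg h6, if_neg h7, if_neg h8, if_pos h9, if_pos c10, if_pos c11, if_pos c12, if_pos c13, if_pos c14, if_pos c15]
    norm_num
  by_cases h10 : n < 200560490130
  · have c11 : n < 7420738134810 := by omega
    have c12 : n < 304250263527210 := by omega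
    have c13 : n < 13082761331670030 := by omega
    have c14 : n < 614889782588491410 := by omega
    have c15 : n < 32589158477190044730 := by omega
    simp only [if_neg h0, if_neg h1, if_neg h2, if_neg h3, if_neg h4, if_neg h5, if_neg h6, if_neg h7, if_neg h8, if_neg h9, if_pos h10, if_pos c11, if_pos c12, if_pos c13, if_pos c14, if_pos c15]
    norm_num
  by_cases h11 : n < 7420738134810
  · have c12 : n < 304250263527210 := by omega
    have c13 : n < 13082761331670030 := by omega
    have c14 : n < 614889782588491410 := by omega
    have c15 : n < 32589158477190044730 := by omega
    simp only [if_neg h0, if_neg h1, if_neg h2, if_neg h3, if_neg h4, if_neg h5, if_neg h6, if_neg h7, if_neg h8, if_neg h9, if_neg h10, if_pos h11, if_pos c12, if_pos c13, if_pos c14, if_pos c15]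
    norm_num
  by_cases h12 : n < 304250263527210
  · have c13 : n < 13082761331670030 := by omega
    have c14 : n < 614889782588491410 := by omega
    have c15 : n < 32589158477190044730 := by omega
    simp only [if_neg h0, if_neg h1, if_neg h2, if_neg h3, if_neg h4, if_neg h5, if_neg h6, if_neg h7, if_neg h8, if_neg h9, if_neg h10, if_neg h11, if_pos h12, if_pos c13, if_pos c14, if_pos c15]
    norm_num
  by_cases h13 : n < 13082761331670030
  · have c14 : n < 614889782588491410 := by omega
    have c15 : n < 32589158477190044730 := by omega
    simp only [if_neg h0, if_neg h1, if_neg h2, if_neg h3, if_neg h4, if_neg h5, if_neg h6, if_neg h7, if_neg h8, if_neg h9, if_neg h10, if_neg h11, if_neg h12, if_pos h13, if_pos c14, if_pos c15]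
    norm_num
  by_cases h14 : n < 614889782588491410
  · have c15 : n < 32589158477190044730 := by omega
    simp only [if_neg h0, if_neg h1, if_neg h2, if_neg h3, if_neg h4, if_neg h5, if_neg h6, if_neg h7, if_neg h8, if_neg h9, if_neg h10, if_neg h11, if_neg h12, if_neg h13, if_pos h14, if_pos c15]
    norm_num
  by_cases h15 : n < 32589158477190044730
  · simp only [if_neg h0, if_neg h1, if_neg h2, if_neg h3, if_neg h4, if_neg h5, if_neg h6, if_neg h7, if_neg h8, if_neg h9, if_neg h10, if_neg h11, if_neg h12, if_neg h13, if_neg h14, if_pos h15]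
    norm_num
  simp only [if_neg h0, if_neg h1, if_neg h2, if_neg h3, if_neg h4, if_neg h5, if_neg h6, if_neg h7, if_neg h8, if_neg h9, if_neg h10, if_neg h11, if_neg h12, if_neg h13, if_neg h14, if_neg h15]
  norm_num
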